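-- pv_equiv track=rewrite | github.com/mkern75/Codyssi | JourneyToAtlantis2025/q08.py | reduce_p2
-- ===== SOURCE A (Python) =====
-- def reduce_p2(l):
--     for i in range(len(l)):
--         if l[i].isdigit():
--             if i > 0 and (l[i - 1].isalpha() or l[i - 1] == "-"):
--                 return reduce_p2(l[:i - 1] + l[i + 1:])
--             if i + 1 < len(l) and (l[i + 1].isalpha() or l[i + 1] == "-"):
--                 return reduce_p2(l[:i] + l[i + 2:])
--     return l
-- ===== SOURCE B (Python) =====
-- def _cancels(a, b):
--     return (b.isdigit() and (a.isalpha() or a == "-")) or \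
--            (a.isdigit() and (b.isalpha() or b == "-"))
--
--
-- def reduce_p2(l):
--     stk = []
--     for x in l:
--         if stk and _cancels(stk[-1], x):
--             stk.pop()
--         else:
--             stk.append(x)
--     return stk
-- ===== Notes on version B (the rewrite author's own statement) =====
-- stated objective: alternative
-- what changed: Replaced A's restart-after-each-cancellation recursion (rescan from the start and rebuild the list by slicing after every removed pair) by a single left-to-right stack pass that cancels a digit with an adjacent letter/dash as it goes.
import Mathlib
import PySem

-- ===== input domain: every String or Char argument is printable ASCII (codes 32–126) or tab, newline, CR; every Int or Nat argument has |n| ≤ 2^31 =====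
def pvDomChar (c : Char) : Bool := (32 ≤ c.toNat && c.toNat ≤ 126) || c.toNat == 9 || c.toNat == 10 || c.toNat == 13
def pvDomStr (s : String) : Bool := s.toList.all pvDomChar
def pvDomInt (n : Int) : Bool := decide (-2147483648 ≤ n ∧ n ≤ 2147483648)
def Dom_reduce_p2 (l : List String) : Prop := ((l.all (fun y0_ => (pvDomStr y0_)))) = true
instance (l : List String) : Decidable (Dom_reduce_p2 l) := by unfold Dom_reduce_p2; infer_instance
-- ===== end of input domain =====

-- B replaces A's restart-after-each-cancellation rescans by a single left-to-right stack pass (objective: alternative).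

-- ===== PORT A =====
-- the 'for i in range(len(l))' loop with early returns; l[:i-1]/l[i+1:] etc. are
-- List.take/List.drop, exact here since the bounds are nonnegative and in range
def reduce_p2Scan (l : List String) (i : Nat) : Option (List String) :=
  if i < l.length then
    if PySem.Str.strIsdigit (l.getD i "") then
      if 0 < i ∧ (PySem.Str.strIsalpha (l.getD (i-1) "") || l.getD (i-1) "" == "-") = true then
        some (l.take (i-1) ++ l.drop (i+1))
      else if i+1 < l.length ∧ (PySem.Str.strIsalpha (l.getD (i+1) "") || l.getD (i+1) "" == "-") = true then
        some (l.take i ++ l.drop (i+2))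
      else reduce_p2Scan l (i+1)
    else reduce_p2Scan l (i+1)
  else none
termination_by l.length - i

theorem reduce_p2Scan_length {l : List String} {i : Nat} {l' : List String}
    (h : reduce_p2Scan l i = some l') : l'.length < l.length := by
  fun_induction reduce_p2Scan l i with
  | case1 i hi hd hleft =>
    simp only [Option.some.injEq] at h
    subst h
    simp [List.length_take, List.length_drop]
    omega
  | case2 i hi hd hleft hright =>
    simp only [Option.some.injEq] at h
    subst h
    simp [List.length_take, List.length_drop]
    omega
  | case3 i hi hd hleft hright ih => exact ih h
  | case4 i hi hd ih => exact ih h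
  | case5 i hi => simp at h

def reduce_p2 (l : List String) : List String :=
  match h : reduce_p2Scan l 0 with
  | some l' => reduce_p2 l'
  | none => l
termination_by l.length
decreasing_by exact reduce_p2Scan_length h

-- ===== PORT B =====
-- the stack is kept top-first (cons); the final reverse restores Python's bottom-first list order
def pvCancels (a b : String) : Bool :=
  (PySem.Str.strIsdigit b && (PySem.Str.strIsalpha a || a == "-")) ||
  (PySem.Str.strIsdigit a && (PySem.Str.strIsalpha b || b == "-"))

def pvStep (stk : List String) (x : String) : List String :=
  match stk with
  | [] => [x]
  | t :: rest => if pvCancels t x then rest else x :: t :: rest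

def reduce_p2_alt (l : List String) : List String := (l.foldl pvStep []).reverse

-- ===== PRECONDITION & SPEC =====
def Spec_reduce_p2 (l : List String) (out : List String) : Prop := out = reduce_p2_alt l
instance (l : List String) (out : List String) : Decidable (Spec_reduce_p2 l out) := by unfold Spec_reduce_p2; infer_instance

-- ===== CLAIM (what is proved, stated in full; the proofs are below) =====
def Claim_equal_reduce_p2 : Prop := ∀ (l : List String), Dom_reduce_p2 l → Spec_reduce_p2 l (reduce_p2 l)

-- ===== LEMMAS AND PROOFS =====

def pvOk (s : String) : Bool := PySem.Str.strIsalpha s || s == "-"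

def pvNoCancel (l : List String) : Prop := List.IsChain (fun a b => pvCancels a b = false) l

theorem char_digit_not_alpha {c : Char} (h : PySem.Chars.isdigit c = true) :
    PySem.Chars.isalpha c = false := by
  simp only [PySem.Chars.isdigit, Bool.and_eq_true, decide_eq_true_eq] at h
  simp only [PySem.Chars.isalpha, PySem.Chars.isupper, PySem.Chars.islower,
    Bool.or_eq_false_iff, Bool.and_eq_false_iff, decide_eq_false_iff_not]
  refine ⟨Or.inl fun hA => ?_, Or.inl fun ha => ?_⟩
  · exact absurd (le_trans hA h.2) (by decide)
  · exact absurd (le_trans ha h.2) (by decide)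

theorem pvOk_of_digit {s : String} (h : PySem.Str.strIsdigit s = true) : pvOk s = false := by
  rw [pvOk]
  by_cases hb : s = "-"
  · subst hb; exact absurd h (by decide)
  · have hb' : (s == "-") = false := by simp [hb]
    rw [hb', Bool.or_false]
    rw [PySem.Str.strIsdigit_eq, PySem.Chars.strIsdigit] at h
    rw [PySem.Str.strIsalpha_eq, PySem.Chars.strIsalpha]
    rcases hcs : s.toList with _ | ⟨c, cs⟩ <;> rw [hcs] at h
    · simp at h
    · simp only [List.all_cons, Bool.and_eq_true, List.isEmpty_cons, Bool.not_false,
        true_and] at h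
      simp [char_digit_not_alpha h.1]

-- a pair is safe when a digit on either side lacks an ok neighbour on the relevant side
theorem pair_safe {l : List String} {j : Nat} (_hj1 : j + 1 < l.length)
    (Hj : PySem.Str.strIsdigit (l.getD j "") = true → pvOk (l.getD (j+1) "") = false)
    (Hj1 : PySem.Str.strIsdigit (l.getD (j+1) "") = true → pvOk (l.getD j "") = false) :
    pvCancels (l.getD j "") (l.getD (j+1) "") = false := by
  by_contra hc
  rw [Bool.not_eq_false, pvCancels, Bool.or_eq_true, Bool.and_eq_true, Bool.and_eq_true] at hc
  rcases hc with ⟨hd, hok⟩ | ⟨hd, hok⟩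
  · rw [← pvOk] at hok; rw [Hj1 hd] at hok; exact Bool.false_ne_true hok
  · rw [← pvOk] at hok; rw [Hj hd] at hok; exact Bool.false_ne_true hok

theorem noCancel_take {l : List String} {k : Nat}
    (hpair : ∀ j, j + 1 < k → j + 1 < l.length →
      pvCancels (l.getD j "") (l.getD (j+1) "") = false) :
    pvNoCancel (l.take k) := by
  rw [pvNoCancel, List.isChain_iff_getElem]
  intro j hj
  simp only [List.length_take, lt_min_iff] at hj
  have hj1 : j + 1 < l.length := hj.2
  have e1 : (l.take k)[j] = l[j] := List.getElem_take
  have e2 : (l.take k)[j+1]'(by simp; omega) = l[j+1] := List.getElem_take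
  rw [e1, e2, ← List.getD_eq_getElem l "" hj1, ← List.getD_eq_getElem l "" (by omega)]
  exact hpair j hj.1 hj1

-- a prefix with no cancelling adjacent pair passes through the stack unchanged
theorem foldl_noCancel (p : List String) (h : pvNoCancel p) :
    p.foldl pvStep [] = p.reverse := by
  induction p using List.reverseRecOn with
  | nil => simp
  | append_singleton q x ih =>
    rw [List.foldl_append]
    have hsplit := List.isChain_append.mp h
    rw [ih hsplit.1]
    rcases hq : q.reverse with _ | ⟨t, rest⟩
    · have : q = [] := by simpa using congrArg List.reverse hq
      subst this; simp [pvStep]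
    · have ht : q.getLast? = some t := by rw [← List.head?_reverse, hq]; rfl
      have hcan : pvCancels t x = false := hsplit.2.2 t ht x rfl
      simp [pvStep, hcan, hq]

-- cancelling the leftmost cancelling pair does not change the stack result
theorem foldl_cancel_pair (p : List String) (a b : String) (r : List String)
    (hab : pvCancels a b = true) (hp : pvNoCancel (p ++ [a])) :
    (p ++ a :: b :: r).foldl pvStep [] = (p ++ r).foldl pvStep [] := by
  have hsplit := List.isChain_append.mp hp
  have hpn : pvNoCancel p := hsplit.1
  rw [List.foldl_append, List.foldl_append, List.foldl_cons, List.foldl_cons,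
    foldl_noCancel p hpn]
  congr 1
  rcases hq : p.reverse with _ | ⟨t, rest⟩
  · have : p = [] := by simpa using congrArg List.reverse hq
    subst this; simp [pvStep, hab]
  · have ht : p.getLast? = some t := by rw [← List.head?_reverse, hq]; rfl
    have hta : pvCancels t a = false := hsplit.2.2 t ht a rfl
    simp [pvStep, hta, hab]

theorem scan_none_digits {l : List String} {i : Nat}
    (h : reduce_p2Scan l i = none) :
    ∀ j, i ≤ j → j < l.length → PySem.Str.strIsdigit (l.getD j "") = true →
      (0 < j → pvOk (l.getD (j-1) "") = false) ∧
      (j + 1 < l.length → pvOk (l.getD (j+1) "") = false) := by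
  fun_induction reduce_p2Scan l i with
  | case1 i hi hd hleft => exact absurd h (by simp)
  | case2 i hi hd hleft hright => exact absurd h (by simp)
  | case3 i hi hd hleft hright ih =>
    intro j hij hj hdig
    rcases Nat.eq_or_lt_of_le hij with rfl | hlt
    · constructor
      · intro h0
        by_contra hb
        exact hleft ⟨h0, Bool.ne_false_iff.mp hb⟩
      · intro h1
        by_contra hb
        exact hright ⟨h1, Bool.ne_false_iff.mp hb⟩
    · exact ih h j hlt hj hdig
  | case4 i hi hd ih =>
    intro j hij hj hdig
    rcases Nat.eq_or_lt_of_le hij with rfl | hlt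
    · exact absurd hdig hd
    · exact ih h j hlt hj hdig
  | case5 i hi =>
    intro j hij hj _
    omega

theorem noCancel_of_scan_none {l : List String} (h : reduce_p2Scan l 0 = none) :
    pvNoCancel l := by
  have hfull : pvNoCancel (l.take l.length) := by
    apply noCancel_take
    intro j hjk hj1
    have H := scan_none_digits h
    refine pair_safe hj1 (fun hd => ?_) (fun hd => ?_)
    · exact (H j (Nat.zero_le _) (by omega) hd).2 hj1
    · have := (H (j+1) (Nat.zero_le _) hj1 hd).1 (by omega)
      simpa using this
  simpa using hfull

theorem scan_some_decomp {l : List String} {i : Nat} {l' : List String}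
    (h : reduce_p2Scan l i = some l')
    (inv : ∀ j, j < i → j < l.length → PySem.Str.strIsdigit (l.getD j "") = true →
      (0 < j → pvOk (l.getD (j-1) "") = false) ∧
      (j + 1 < l.length → pvOk (l.getD (j+1) "") = false)) :
    ∃ p a b r, l = p ++ a :: b :: r ∧ l' = p ++ r ∧ pvCancels a b = true ∧
      pvNoCancel (p ++ [a]) := by
  fun_induction reduce_p2Scan l i with
  | case1 i hi hd hleft =>
    obtain ⟨h0, hok⟩ := hleft
    obtain ⟨k, rfl⟩ : ∃ k, i = k + 1 := ⟨i - 1, by omega⟩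
    simp only [Nat.add_sub_cancel] at hok
    have h1 : k < l.length := by omega
    simp only [Option.some.injEq, Nat.add_sub_cancel] at h
    refine ⟨l.take k, l.getD k "", l.getD (k+1) "", l.drop (k+2), ?_, h.symm, ?_, ?_⟩
    · conv_lhs => rw [← List.take_append_drop k l]
      rw [List.drop_eq_getElem_cons h1, List.getD_eq_getElem l "" h1,
        List.drop_eq_getElem_cons hi, List.getD_eq_getElem l "" hi]
    · rw [pvCancels, hd, hok]; simp
    · have htake : l.take k ++ [l.getD k ""] = l.take (k+1) := by
        rw [List.getD_eq_getElem l "" h1, List.take_add_one, List.getElem?_eq_getElem h1]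
        rfl
      rw [htake]
      apply noCancel_take
      intro j hjk hj1
      refine pair_safe hj1 (fun hdg => ?_) (fun hdg => ?_)
      · exact (inv j (by omega) (by omega) hdg).2 hj1
      · have := (inv (j+1) (by omega) (by omega) hdg).1 (by omega)
        simpa using this
  | case2 i hi hd hleft hright =>
    obtain ⟨h1, hok⟩ := hright
    simp only [Option.some.injEq] at h
    refine ⟨l.take i, l.getD i "", l.getD (i+1) "", l.drop (i+2), ?_, h.symm, ?_, ?_⟩
    · conv_lhs => rw [← List.take_append_drop i l]
      rw [List.drop_eq_getElem_cons hi, List.getD_eq_getElem l "" hi,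
        List.drop_eq_getElem_cons h1, List.getD_eq_getElem l "" h1]
    · rw [pvCancels, hd, hok]; simp
    · have htake : l.take i ++ [l.getD i ""] = l.take (i+1) := by
        rw [List.getD_eq_getElem l "" hi, List.take_add_one, List.getElem?_eq_getElem hi]
        rfl
      rw [htake]
      apply noCancel_take
      intro j hjk hj1
      refine pair_safe hj1 (fun hdg => ?_) (fun hdg => ?_)
      · rcases Nat.lt_or_ge (j+1) i with hji | hji
        · exact (inv j (by omega) (by omega) hdg).2 hj1
        · have : j + 1 = i := by omega
          subst this
          exact pvOk_of_digit hd
      · rcases Nat.lt_or_ge (j+1) i with hji | hji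
        · have := (inv (j+1) (by omega) (by omega) hdg).1 (by omega)
          simpa using this
        · have hji' : j + 1 = i := by omega
          subst hji'
          by_contra hb
          have hj' : j + 1 - 1 = j := by omega
          exact hleft ⟨by omega, by rw [hj']; exact Bool.ne_false_iff.mp hb⟩
  | case3 i hi hd hleft hright ih =>
    apply ih h
    intro j hij hj hdig
    rcases Nat.lt_or_ge j i with hlt | hge
    · exact inv j hlt hj hdig
    · have : j = i := by omega
      subst this
      constructor
      · intro h0
        by_contra hb
        exact hleft ⟨h0, Bool.ne_false_iff.mp hb⟩
      · intro h1
        by_contra hb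
        exact hright ⟨h1, Bool.ne_false_iff.mp hb⟩
  | case4 i hi hd ih =>
    apply ih h
    intro j hij hj hdig
    rcases Nat.lt_or_ge j i with hlt | hge
    · exact inv j hlt hj hdig
    · have : j = i := by omega
      subst this
      exact absurd hdig hd
  | case5 i hi => simp at h

theorem reduce_p2_eq_alt (l : List String) : reduce_p2 l = reduce_p2_alt l := by
  fun_induction reduce_p2 l with
  | case1 l l' hscan ih =>
    obtain ⟨p, a, b, r, hl, hl', hab, hnc⟩ := scan_some_decomp hscan (by intro j hj; omega)
    rw [ih, reduce_p2_alt, reduce_p2_alt, hl, hl', foldl_cancel_pair p a b r hab hnc]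
  | case2 l hscan =>
    rw [reduce_p2_alt, foldl_noCancel l (noCancel_of_scan_none hscan), List.reverse_reverse]

-- ===== VERDICT (by name: the statement is the Claim_ definition above) =====
theorem reduce_p2_spec : Claim_equal_reduce_p2 := by
  intro l _
  unfold Spec_reduce_p2
  exact reduce_p2_eq_alt l
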